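-- pv_equiv track=rewrite | github.com/ccschillinger/Sample-Work | 6.009/lab6/lab.py | label_possibilities
-- ===== SOURCE A (Python) =====
-- def label_possibilities(node_label, label_list, items = [[]]):
--     """Makes a list of every possibly node combination that fits the labels of the pattern without
--         checking the edges"""
--     if label_list == []:
--         return items
--     else:
--         new_items = []
--         for item in items:
--             for node in node_label:
--                 if (node_label[node] == label_list[0]) or (label_list[0]) == "*":
--                     item_copy = item.copy()
--                     item_copy.append(node)
--                     new_items.append(item_copy)
--         return label_possibilities(node_label, label_list[1:], new_items)
-- ===== SOURCE B (Python) =====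
-- def label_possibilities(node_label, label_list, items=[[]]):
--     """Same result as A: precompute per-label candidate lists, build the
--     Cartesian product back-to-front, then prepend each seed item."""
--     candidates = [[node for node in node_label
--                    if node_label[node] == label or label == "*"]
--                   for label in label_list]
--     combos = [[]]
--     for cand in reversed(candidates):
--         combos = [[n] + c for n in cand for c in combos]
--     return [item + combo for item in items for combo in combos]
-- ===== Notes on version B (the rewrite author's own statement) =====
-- stated objective: alternative
-- what changed: Replaces A's label-by-label recursion that rebuilds the whole item list at each level with precomputed per-label candidate lists, an iterative back-to-front Cartesian product of those lists, and a single final pass prepending each seed item.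
import Mathlib
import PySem

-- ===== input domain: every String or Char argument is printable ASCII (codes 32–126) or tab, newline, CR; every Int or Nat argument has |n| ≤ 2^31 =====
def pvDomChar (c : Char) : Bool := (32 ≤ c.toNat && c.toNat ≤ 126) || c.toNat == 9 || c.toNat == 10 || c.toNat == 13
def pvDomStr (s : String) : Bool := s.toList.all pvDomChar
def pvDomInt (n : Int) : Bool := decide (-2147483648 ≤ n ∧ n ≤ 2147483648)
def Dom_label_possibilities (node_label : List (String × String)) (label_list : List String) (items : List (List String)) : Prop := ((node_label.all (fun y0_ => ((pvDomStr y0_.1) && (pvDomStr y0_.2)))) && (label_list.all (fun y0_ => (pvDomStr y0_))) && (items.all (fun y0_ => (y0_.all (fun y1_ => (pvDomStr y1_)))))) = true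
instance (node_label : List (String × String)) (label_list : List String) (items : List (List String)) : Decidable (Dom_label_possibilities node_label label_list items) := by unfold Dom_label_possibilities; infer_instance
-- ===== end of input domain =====

-- B precomputes per-label candidate lists once and emits the Cartesian product
-- back-to-front instead of A's label-by-label recursion; objective: alternative/simpler.

-- ===== PORT A =====
-- A recurses on label_list; each level rebuilds new_items by appending one
-- matching node to every item.  'node in node_label' iterates the dict's keys,
-- 'node_label[node]' looks the value up (the key is always present, so getD is exact).
def label_possibilities (node_label : List (String × String)) (label_list : List String) (items : List (List String)) : List (List String) :=
  match label_list with
  | [] => items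
  | l :: rest =>
      let d := PySem.Dict.ofList node_label
      let new_items := items.foldl (fun acc item =>
        d.keys.foldl (fun acc node =>
          if d.getD node "" == l || l == "*" then acc ++ [item ++ [node]] else acc) acc) []
      label_possibilities node_label rest new_items

-- ===== PORT B =====
def label_possibilities_alt (node_label : List (String × String)) (label_list : List String) (items : List (List String)) : List (List String) :=
  let d := PySem.Dict.ofList node_label
  let candidates := label_list.map (fun label =>
    d.keys.filter (fun node => d.getD node "" == label || label == "*"))
  let combos := candidates.reverse.foldl
    (fun combos cand => cand.flatMap (fun n => combos.map (fun c => n :: c))) [[]]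
  items.flatMap (fun item => combos.map (fun c => item ++ c))

-- ===== PRECONDITION & SPEC =====
def Spec_label_possibilities (node_label : List (String × String)) (label_list : List String) (items : List (List String)) (out : List (List String)) : Prop := out = label_possibilities_alt node_label label_list items
instance (node_label : List (String × String)) (label_list : List String) (items : List (List String)) (out : List (List String)) : Decidable (Spec_label_possibilities node_label label_list items out) := by unfold Spec_label_possibilities; infer_instance

-- ===== CLAIM (what is proved, stated in full; the proofs are below) =====
def Claim_equal_label_possibilities : Prop := ∀ (node_label : List (String × String)) (label_list : List String) (items : List (List String)), Dom_label_possibilities node_label label_list items → Spec_label_possibilities node_label label_list items (label_possibilities node_label label_list items)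

-- ===== LEMMAS AND PROOFS =====

-- the per-label candidate list
def pvCand (d : PySem.Dict String String) (l : String) : List String :=
  d.keys.filter (fun node => d.getD node "" == l || l == "*")

-- the inner 'for node in node_label' loop appends exactly the candidates
lemma inner_fold (d : PySem.Dict String String) (l : String) (item : List String) :
    ∀ (keys : List String) (acc : List (List String)),
      keys.foldl (fun acc node =>
        if d.getD node "" == l || l == "*" then acc ++ [item ++ [node]] else acc) acc
      = acc ++ (keys.filter (fun node => d.getD node "" == l || l == "*")).map
          (fun n => item ++ [n]) := by
  intro keys
  induction keys with
  | nil => simp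
  | cons k ks ih =>
      intro acc
      simp only [List.foldl_cons, List.filter_cons]
      by_cases h : (d.getD k "" == l || l == "*") = true
      · rw [if_pos h, if_pos h, ih]
        simp
      · rw [if_neg h, if_neg h, ih]

-- the 'for item in items' loop with the inner loop inlined is one flatMap
lemma new_items_eq (d : PySem.Dict String String) (l : String) :
    ∀ (items : List (List String)) (acc : List (List String)),
      items.foldl (fun acc item =>
        d.keys.foldl (fun acc node =>
          if d.getD node "" == l || l == "*" then acc ++ [item ++ [node]] else acc) acc) acc
      = acc ++ items.flatMap (fun item => (pvCand d l).map (fun n => item ++ [n])) := by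
  intro items
  induction items with
  | nil => simp
  | cons x xs ih =>
      intro acc
      simp only [List.foldl_cons, List.flatMap_cons]
      rw [inner_fold, ih, List.append_assoc]
      rfl

-- B's iterative reversed-product, as a recursion on the label list
def pvCombos (d : PySem.Dict String String) : List String → List (List String)
  | [] => [[]]
  | l :: rest => (pvCand d l).flatMap (fun n => (pvCombos d rest).map (fun c => n :: c))

lemma combos_eq (d : PySem.Dict String String) (ls : List String) :
    ((ls.map (fun label =>
        d.keys.filter (fun node => d.getD node "" == label || label == "*"))).reverse).foldl
      (fun combos cand => cand.flatMap (fun n => combos.map (fun c => n :: c))) [[]]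
    = pvCombos d ls := by
  rw [List.foldl_reverse, List.foldr_map]
  induction ls with
  | nil => rfl
  | cons l rest ih => simp only [List.foldr_cons, ih, pvCombos, pvCand]

lemma main_eq (node_label : List (String × String)) :
    ∀ (ls : List String) (items : List (List String)),
      label_possibilities node_label ls items
      = items.flatMap (fun item =>
          (pvCombos (PySem.Dict.ofList node_label) ls).map (fun c => item ++ c)) := by
  intro ls
  induction ls with
  | nil => intro items; simp [label_possibilities, pvCombos]
  | cons l rest ih =>
      intro items
      show label_possibilities node_label rest
          (items.foldl (fun acc item =>
            (PySem.Dict.ofList node_label).keys.foldl (fun acc node =>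
              if (PySem.Dict.ofList node_label).getD node "" == l || l == "*" then
                acc ++ [item ++ [node]] else acc) acc) []) = _
      rw [ih, new_items_eq, List.nil_append, pvCombos]
      simp [List.flatMap_assoc, List.map_flatMap, List.flatMap_map, Function.comp_def]

-- ===== VERDICT (by name: the statement is the Claim_ definition above) =====
theorem label_possibilities_spec : Claim_equal_label_possibilities := by
  intro node_label label_list items _
  show label_possibilities node_label label_list items = label_possibilities_alt node_label label_list items
  rw [main_eq, ← combos_eq]
  rfl
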